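-- pv_equiv track=rewrite | github.com/polaires/Banta_Lab_RFdiffusion | backend/serverless/scaffolding_workflow.py | scan_pdb_hetatm
-- ===== SOURCE A (Python) =====
-- from typing import Dict, List, Optional, Any, Tuple, Set
--
-- KNOWN_PDB_METALS = {
--     "ZN", "FE", "MG", "CA", "MN", "CU", "CO", "NI",
--     "TB", "EU", "GD", "LA", "CE", "SM", "YB", "DY",
--     "CD", "HG", "PB", "MO", "W", "V", "CR", "PT", "RU",
-- }
--
-- def scan_pdb_hetatm(pdb_content: str) -> Tuple[Set[str], Set[str]]:
--     """Scan PDB content and return sets of metals and ligands found.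
--
--     Args:
--         pdb_content: Raw PDB file content
--
--     Returns:
--         (metals_found, ligands_found) — sets of 3-letter residue names
--     """
--     metals = set()
--     ligands = set()
--
--     for line in pdb_content.split('\n'):
--         if line.startswith('HETATM'):
--             res_name = line[17:20].strip()
--             if res_name in KNOWN_PDB_METALS:
--                 metals.add(res_name)
--             elif len(res_name) >= 1 and res_name not in {"HOH", "WAT", "DOD"}:
--                 ligands.add(res_name)
--
--     return metals, ligands
-- ===== SOURCE B (Python) =====
-- KNOWN_PDB_METALS = {
--     "ZN", "FE", "MG", "CA", "MN", "CU", "CO", "NI",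
--     "TB", "EU", "GD", "LA", "CE", "SM", "YB", "DY",
--     "CD", "HG", "PB", "MO", "W", "V", "CR", "PT", "RU",
-- }
--
--
-- def scan_pdb_hetatm(pdb_content):
--     """Split on the record marker '\\nHETATM' instead of iterating lines:
--     each chunk after the first starts right after a HETATM tag at a line start."""
--     metals, ligands = set(), set()
--     for chunk in ('\n' + pdb_content).split('\nHETATM')[1:]:
--         res = chunk.split('\n')[0][11:14].strip()
--         if res and res not in ("HOH", "WAT", "DOD"):
--             (metals if res in KNOWN_PDB_METALS else ligands).add(res)
--     return metals, ligands
-- ===== Notes on version B (the rewrite author's own statement) =====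
-- stated objective: alternative
-- what changed: Instead of iterating over the lines and testing each with startswith, B splits the whole buffer on the record marker (a newline followed by the HETATM tag, with a newline prepended so a leading record is caught); every chunk after the first begins right after a tag at a line start, so the residue name is cols 11:14 of the chunk's first line, classified into metals/ligands as found.
import Mathlib
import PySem

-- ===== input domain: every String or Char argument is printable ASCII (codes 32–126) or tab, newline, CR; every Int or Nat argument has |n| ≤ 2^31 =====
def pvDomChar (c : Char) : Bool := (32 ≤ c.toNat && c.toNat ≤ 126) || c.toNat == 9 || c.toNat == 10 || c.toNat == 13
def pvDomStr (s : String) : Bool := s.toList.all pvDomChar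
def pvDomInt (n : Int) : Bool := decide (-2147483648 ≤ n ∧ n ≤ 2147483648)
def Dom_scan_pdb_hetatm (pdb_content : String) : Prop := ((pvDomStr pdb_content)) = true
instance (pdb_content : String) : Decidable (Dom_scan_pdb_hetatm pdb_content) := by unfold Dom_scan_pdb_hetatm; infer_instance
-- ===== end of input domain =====

-- B splits the raw buffer on the record marker (newline + HETATM tag) instead of iterating over lines:
-- each chunk after the first begins right after a HETATM tag at a line start (alternative traversal, same cost).

-- ===== PORT A =====
def pvKnownMetals : PySem.Set String := PySem.Set.ofList
  ["ZN", "FE", "MG", "CA", "MN", "CU", "CO", "NI",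
   "TB", "EU", "GD", "LA", "CE", "SM", "YB", "DY",
   "CD", "HG", "PB", "MO", "W", "V", "CR", "PT", "RU"]

-- A: line[17:20].strip()
def pvResOf (line : String) : String :=
  PySem.Str.strip (PySem.Str.slice line (some 17) (some 20))

def pvStepA (acc : PySem.Set String × PySem.Set String) (line : String) :
    PySem.Set String × PySem.Set String :=
  if PySem.Str.startswith line "HETATM" then
    let res := pvResOf line
    if pvKnownMetals.contains res then
      (acc.1.add res, acc.2)
    else if 1 ≤ PySem.Str.len res ∧ (PySem.Set.ofList ["HOH", "WAT", "DOD"]).contains res = false then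
      (acc.1, acc.2.add res)
    else acc
  else acc

def scan_pdb_hetatm (pdb_content : String) : List String × List String :=
  ((PySem.Str.split? pdb_content "\n").getD []).foldl pvStepA (PySem.Set.empty, PySem.Set.empty)

-- ===== PORT B =====
-- B: chunk.split('\n')[0][11:14].strip()
def pvResOfChunk (chunk : String) : String :=
  PySem.Str.strip (PySem.Str.slice
    ((PySem.List.pyGet? ((PySem.Str.split? chunk "\n").getD []) 0).getD "")
    (some 11) (some 14))

def pvStepB (acc : PySem.Set String × PySem.Set String) (chunk : String) :
    PySem.Set String × PySem.Set String :=
  let res := pvResOfChunk chunk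
  if res ≠ "" ∧ (["HOH", "WAT", "DOD"].contains res) = false then
    if pvKnownMetals.contains res then (acc.1.add res, acc.2) else (acc.1, acc.2.add res)
  else acc

def scan_pdb_hetatm_alt (pdb_content : String) : List String × List String :=
  (PySem.List.slice ((PySem.Str.split? ("\n" ++ pdb_content) "\nHETATM").getD []) (some 1) none).foldl
    pvStepB (PySem.Set.empty, PySem.Set.empty)

-- ===== PRECONDITION & SPEC =====
def Spec_scan_pdb_hetatm (pdb_content : String) (out : List String × List String) : Prop := out = scan_pdb_hetatm_alt pdb_content
instance (pdb_content : String) (out : List String × List String) : Decidable (Spec_scan_pdb_hetatm pdb_content out) := by unfold Spec_scan_pdb_hetatm; infer_instance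

-- ===== CLAIM (what is proved, stated in full; the proofs are below) =====
def Claim_equal_scan_pdb_hetatm : Prop := ∀ (pdb_content : String), Dom_scan_pdb_hetatm pdb_content → Spec_scan_pdb_hetatm pdb_content (scan_pdb_hetatm pdb_content)

-- ===== LEMMAS AND PROOFS =====

-- fuel-free reformulation of PySem.Chars.splitOn
def pvSplit (sep : List Char) : List Char → List (List Char)
  | [] => [[]]
  | c :: rest =>
    if sep.isPrefixOf (c :: rest) then
      [] :: pvSplit sep (rest.drop (sep.length - 1))
    else
      (pvSplit sep rest).modifyHead (c :: ·)
termination_by l => l.length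
decreasing_by
  · simp only [List.length_drop, List.length_cons]; omega
  · simp only [List.length_cons]; omega

def pvHET : List Char := ['H', 'E', 'T', 'A', 'T', 'M']
def pvSep2 : List Char := '\n' :: pvHET

theorem pvMH_comp {f g : List Char → List Char} (xs : List (List Char)) :
    (xs.modifyHead g).modifyHead f = xs.modifyHead (fun x => f (g x)) := by
  cases xs <;> simp

theorem pvGo_eq (sep : List Char) (hsep : sep ≠ []) :
    ∀ fuel l cur acc, l.length < fuel →
      PySem.Chars.splitOn.go sep fuel l cur acc
        = acc.reverse ++ (pvSplit sep l).modifyHead (cur.reverse ++ ·) := by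
  intro fuel
  induction fuel with
  | zero => intro l cur acc h; omega
  | succ fuel ih =>
    intro l cur acc h
    match l with
    | [] =>
      simp [PySem.Chars.splitOn.go, pvSplit]
    | c :: rest =>
      rw [PySem.Chars.splitOn.go]
      by_cases hp : sep.isPrefixOf (c :: rest) = true
      · rw [if_pos hp]
        have hlen : (List.drop sep.length (c :: rest)).length < fuel := by
          simp only [List.length_drop, List.length_cons] at *
          have : 1 ≤ sep.length := by cases sep <;> simp_all
          omega
        rw [ih _ _ _ hlen]
        have hdrop : List.drop sep.length (c :: rest) = rest.drop (sep.length - 1) := by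
          obtain ⟨s0, sep', rfl⟩ : ∃ s0 sep', sep = s0 :: sep' := by
            cases sep with
            | nil => exact absurd rfl hsep
            | cons a b => exact ⟨a, b, rfl⟩
          simp
        rw [hdrop]
        rw [pvSplit, if_pos hp]
        cases pvSplit sep (rest.drop (sep.length - 1)) <;> simp
      · rw [if_neg hp]
        have hlen : rest.length < fuel := by simp only [List.length_cons] at h; omega
        rw [ih _ _ _ hlen]
        rw [pvSplit, if_neg hp, pvMH_comp]
        cases pvSplit sep rest <;> simp

theorem pvSplitOn_eq (s sep : List Char) (hsep : sep ≠ []) :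
    PySem.Chars.splitOn s sep = pvSplit sep s := by
  unfold PySem.Chars.splitOn
  rw [pvGo_eq sep hsep _ _ _ _ (by omega)]
  cases pvSplit sep s <;> simp

theorem pvSplit_ne_nil_aux (sep : List Char) : ∀ n (l : List Char), l.length ≤ n → pvSplit sep l ≠ [] := by
  intro n
  induction n with
  | zero =>
    intro l h
    have : l = [] := by cases l <;> simp_all
    subst this
    simp [pvSplit]
  | succ n ih =>
    intro l h
    cases l with
    | nil => simp [pvSplit]
    | cons c rest =>
      rw [pvSplit]
      split
      · simp
      · have hne := ih rest (by simp at h; omega)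
        cases hc : pvSplit sep rest with
        | nil => exact absurd hc hne
        | cons a b => simp

theorem pvSplit_ne_nil (sep l : List Char) : pvSplit sep l ≠ [] :=
  pvSplit_ne_nil_aux sep l.length l le_rfl

-- consuming characters that cannot start the separator
theorem pvConsume (c₀ : Char) (sep' l r : List Char) (h : c₀ ∉ l) :
    pvSplit (c₀ :: sep') (l ++ r) = (pvSplit (c₀ :: sep') r).modifyHead (l ++ ·) := by
  induction l with
  | nil =>
    simp only [List.nil_append]
    cases h' : pvSplit (c₀ :: sep') r <;> simp
  | cons a l ih =>
    have ha : ¬ c₀ = a := by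
      simp only [List.mem_cons, not_or] at h
      exact h.1
    have h' : c₀ ∉ l := by simp only [List.mem_cons, not_or] at h; exact h.2
    rw [List.cons_append, pvSplit, if_neg (by simp [List.isPrefixOf, ha]), ih h', pvMH_comp]
    cases pvSplit (c₀ :: sep') r <;> simp

theorem pvSplit_nl_free (l : List Char) (h : '\n' ∉ l) : pvSplit ['\n'] l = [l] := by
  have := pvConsume '\n' [] l [] h
  simpa [pvSplit] using this

theorem pvSplit_nl_cons (l r : List Char) (h : '\n' ∉ l) :
    pvSplit ['\n'] (l ++ '\n' :: r) = l :: pvSplit ['\n'] r := by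
  rw [pvConsume '\n' [] l _ h, pvSplit, if_pos (by simp [List.isPrefixOf])]
  simp

-- a prefix free of c cannot span past an occurrence of c
theorem pvPrefix_span (a l r : List Char) (c : Char) (hc : c ∉ a) :
    a <+: (l ++ c :: r) ↔ a <+: l := by
  constructor
  · intro h
    by_cases hl : a.length ≤ l.length
    · exact List.prefix_of_prefix_length_le h (List.prefix_append l (c :: r)) hl
    · exfalso
      have h2 : (l ++ [c]) <+: (l ++ c :: r) := by
        have : l ++ c :: r = (l ++ [c]) ++ r := by simp
        rw [this]; exact List.prefix_append _ _
      have h3 : (l ++ [c]) <+: a :=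
        List.prefix_of_prefix_length_le h2 h (by simp; omega)
      exact hc (h3.sublist.mem (by simp))
  · intro h
    exact h.trans (List.prefix_append l (c :: r))

theorem pvDropWhile_head (p : Char → Bool) (s : List Char) (x : Char) (xs : List Char)
    (h : s.dropWhile p = x :: xs) : p x = false := by
  induction s with
  | nil => simp at h
  | cons a s ih =>
    rw [List.dropWhile_cons] at h
    by_cases hp : p a = true
    · rw [if_pos hp] at h; exact ih h
    · rw [if_neg hp] at h
      cases h
      exact Bool.eq_false_iff.mpr hp

-- the chunks of '\n'::s under separator '\nHETATM', related to the HETATM lines of s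
theorem pvMain (n : ℕ) : ∀ s : List Char, s.length ≤ n →
    ∃ h t, pvSplit pvSep2 ('\n' :: s) = h :: t ∧ (h = [] ∨ ∃ h', h = '\n' :: h') ∧
      t.map (List.takeWhile (· ≠ '\n'))
        = ((pvSplit ['\n'] s).filter (fun l => pvHET.isPrefixOf l)).map (List.drop 6) := by
  induction n with
  | zero =>
    intro s hs
    have : s = [] := List.eq_nil_of_length_eq_zero (by omega)
    subst this
    refine ⟨['\n'], [], ?_, Or.inr ⟨[], rfl⟩, ?_⟩
    · rw [pvSplit, if_neg (by decide)]; simp [pvSplit]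
    · simp [pvSplit_nl_free [] (by simp), pvHET]
  | succ n ih =>
    intro s hs
    have hdec := List.takeWhile_append_dropWhile (p := (· ≠ '\n')) (l := s)
    set l := s.takeWhile (· ≠ '\n') with hl
    set rest := s.dropWhile (· ≠ '\n') with hrest
    have hnl : '\n' ∉ l := by
      intro hmem
      have := List.mem_takeWhile_imp hmem
      simp at this
    cases hrc : rest with
    | nil =>
      have hsl : s = l := by rw [← hdec, hrc, List.append_nil]
      by_cases hH : pvHET.isPrefixOf l = true
      · have h6 : 6 ≤ l.length := by
          have := (List.isPrefixOf_iff_prefix.mp hH).length_le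
          simpa [pvHET] using this
        have hnl6 : '\n' ∉ l.drop 6 := fun hm => hnl (List.mem_of_mem_drop hm)
        refine ⟨[], [l.drop 6], ?_, Or.inl rfl, ?_⟩
        · rw [hsl, pvSplit, if_pos ?pos]
          case pos =>
            show (('\n' :: pvHET).isPrefixOf ('\n' :: l)) = true
            simp [List.isPrefixOf, hH]
          have : pvSep2.length - 1 = 6 := by decide
          rw [this]
          have := pvConsume '\n' pvHET (l.drop 6) [] hnl6
          simp only [List.append_nil] at this
          rw [show pvSep2 = '\n' :: pvHET from rfl, this]
          simp [pvSplit]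
        · rw [hsl, pvSplit_nl_free l hnl]
          simp only [List.filter_cons, hH, List.filter_nil, List.map]
          simp
          exact fun x hx e => hnl6 (e ▸ hx)
      · refine ⟨'\n' :: l, [], ?_, Or.inr ⟨l, rfl⟩, ?_⟩
        · rw [hsl, pvSplit, if_neg ?neg]
          case neg =>
            show ¬ (('\n' :: pvHET).isPrefixOf ('\n' :: l)) = true
            simp [List.isPrefixOf, hH]
          have := pvConsume '\n' pvHET l [] hnl
          simp only [List.append_nil] at this
          rw [show pvSep2 = '\n' :: pvHET from rfl, this]
          simp [pvSplit]
        · rw [hsl, pvSplit_nl_free l hnl]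
          simp [hH]
    | cons r0 r' =>
      have hr0 : r0 = '\n' := by
        have := pvDropWhile_head _ s r0 r' (by rw [← hrest, hrc])
        simpa using this
      subst hr0
      have hsl : s = l ++ '\n' :: r' := by rw [← hdec, hrc]
      have hr'len : r'.length ≤ n := by
        have : s.length = l.length + 1 + r'.length := by rw [hsl]; simp; omega
        omega
      obtain ⟨h', t', hsplit', hh', ht'⟩ := ih r' hr'len
      have hlines : pvSplit ['\n'] s = l :: pvSplit ['\n'] r' := by
        rw [hsl]; exact pvSplit_nl_cons l r' hnl
      have htw_h' : h'.takeWhile (· ≠ '\n') = [] := by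
        rcases hh' with rfl | ⟨h'', rfl⟩
        · rfl
        · simp
      by_cases hH : pvHET.isPrefixOf l = true
      · have h6 : 6 ≤ l.length := by
          have := (List.isPrefixOf_iff_prefix.mp hH).length_le
          simpa [pvHET] using this
        have hnl6 : '\n' ∉ l.drop 6 := fun hm => hnl (List.mem_of_mem_drop hm)
        have hHs : pvHET.isPrefixOf s = true := by
          rw [List.isPrefixOf_iff_prefix, hsl, pvPrefix_span _ _ _ _ (by decide)]
          exact List.isPrefixOf_iff_prefix.mp hH
        refine ⟨[], (l.drop 6 ++ h') :: t', ?_, Or.inl rfl, ?_⟩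
        · rw [hsl, pvSplit, if_pos ?pos2]
          case pos2 =>
            show (('\n' :: pvHET).isPrefixOf ('\n' :: (l ++ '\n' :: r'))) = true
            rw [← hsl]
            simp [List.isPrefixOf, hHs]
          have hlen2 : pvSep2.length - 1 = 6 := by decide
          rw [hlen2]
          have hdrop : (l ++ '\n' :: r').drop 6 = l.drop 6 ++ '\n' :: r' :=
            List.drop_append_of_le_length h6
          rw [hdrop]
          have := pvConsume '\n' pvHET (l.drop 6) ('\n' :: r') hnl6
          rw [show pvSep2 = '\n' :: pvHET from rfl] at hsplit' ⊢
          rw [this, hsplit']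
          simp
        · rw [hlines]
          simp only [List.filter_cons, hH, List.map]
          rw [List.takeWhile_append_of_pos (by intro x hx; simp; intro e; exact hnl6 (e ▸ hx))]
          rw [htw_h', List.append_nil, ht']
          simp
      · refine ⟨'\n' :: (l ++ h'), t', ?_, Or.inr ⟨l ++ h', rfl⟩, ?_⟩
        · rw [hsl, pvSplit, if_neg ?neg2]
          case neg2 =>
            show ¬ (('\n' :: pvHET).isPrefixOf ('\n' :: (l ++ '\n' :: r'))) = true
            have : ¬ pvHET.isPrefixOf (l ++ '\n' :: r') = true := by
              rw [List.isPrefixOf_iff_prefix, pvPrefix_span _ _ _ _ (by decide)]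
              rw [← List.isPrefixOf_iff_prefix]
              simp [hH]
            simp [List.isPrefixOf, this]
          have := pvConsume '\n' pvHET l ('\n' :: r') hnl
          rw [show pvSep2 = '\n' :: pvHET from rfl] at hsplit' ⊢
          rw [this, hsplit']
          simp
        · rw [hlines]
          simp only [List.filter_cons, hH, ht']
          simp

-- head of the line split is the first line
theorem pvSplit_head (c : List Char) :
    (pvSplit ['\n'] c).headD [] = c.takeWhile (· ≠ '\n') := by
  have hdec := List.takeWhile_append_dropWhile (p := (· ≠ '\n')) (l := c)
  set l := c.takeWhile (· ≠ '\n') with hl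
  set rest := c.dropWhile (· ≠ '\n') with hrest
  have hnl : '\n' ∉ l := by
    intro hmem
    have := List.mem_takeWhile_imp hmem
    simp at this
  cases hrc : rest with
  | nil =>
    have hsl : c = l := by rw [← hdec, hrc, List.append_nil]
    rw [hsl, pvSplit_nl_free l hnl]; rfl
  | cons r0 r' =>
    have hr0 : r0 = '\n' := by
      have := pvDropWhile_head _ c r0 r' (by rw [← hrest, hrc])
      simpa using this
    subst hr0
    have hsl : c = l ++ '\n' :: r' := by rw [← hdec, hrc]
    rw [hsl, pvSplit_nl_cons l r' hnl]; rfl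

-- residue extraction, at the character level
def pvResC (l : List Char) : String :=
  String.ofList (PySem.Chars.strip (List.take 3 (List.drop 17 l)))

theorem pvResOf_ofList (l : List Char) :
    pvResOf (String.ofList l) = pvResC l := by
  have : (pvResOf (String.ofList l)).toList
      = PySem.Chars.strip (List.take 3 (List.drop 17 l)) := by
    rw [pvResOf, PySem.Str.toList_strip, PySem.Str.toList_slice, String.toList_ofList]
    congr 1
    have := PySem.List.slice_natCast (xs := l) (a := 17) (b := 20)
    simpa using this
  rw [← String.ofList_toList (s := pvResOf (String.ofList l)), this, pvResC]

theorem pvResOfChunk_ofList (c : List Char) :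
    pvResOfChunk (String.ofList c)
      = String.ofList (PySem.Chars.strip
          (List.take 3 (List.drop 11 (c.takeWhile (· ≠ '\n'))))) := by
  have hsplit : (PySem.Str.split? (String.ofList c) "\n").getD []
      = (pvSplit ['\n'] c).map String.ofList := by
    rw [PySem.Str.split?]
    have : PySem.Chars.split? (String.ofList c).toList ("\n" : String).toList
        = some (pvSplit ['\n'] c) := by
      rw [PySem.Chars.split?]
      rw [if_neg (by simp)]
      rw [String.toList_ofList]
      rw [pvSplitOn_eq _ _ (by simp)]
      rfl
    rw [this]
    rfl
  obtain ⟨h0, t0, hht⟩ : ∃ h0 t0, pvSplit ['\n'] c = h0 :: t0 := by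
    cases hc : pvSplit ['\n'] c with
    | nil => exact absurd hc (pvSplit_ne_nil _ _)
    | cons a b => exact ⟨a, b, rfl⟩
  have hh0 : h0 = c.takeWhile (· ≠ '\n') := by
    have := pvSplit_head c
    rw [hht] at this
    simpa using this
  have hfirst : (PySem.List.pyGet? ((PySem.Str.split? (String.ofList c) "\n").getD []) 0).getD ""
      = String.ofList (c.takeWhile (· ≠ '\n')) := by
    rw [hsplit, hht, hh0]
    simp [PySem.List.pyGet?, PySem.List.pyIdx?]
  have hkey : (pvResOfChunk (String.ofList c)).toList
      = PySem.Chars.strip (List.take 3 (List.drop 11 (c.takeWhile (· ≠ '\n')))) := by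
    rw [pvResOfChunk, hfirst, PySem.Str.toList_strip, PySem.Str.toList_slice, String.toList_ofList]
    congr 1
    have := PySem.List.slice_natCast (xs := c.takeWhile (· ≠ '\n')) (a := 11) (b := 14)
    simpa using this
  rw [← String.ofList_toList (s := pvResOfChunk (String.ofList c)), hkey]

-- the classification of a residue string, common to both step functions
def pvClass (acc : PySem.Set String × PySem.Set String) (res : String) :
    PySem.Set String × PySem.Set String :=
  if res ≠ "" ∧ (["HOH", "WAT", "DOD"].contains res) = false then
    if pvKnownMetals.contains res then (acc.1.add res, acc.2) else (acc.1, acc.2.add res)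
  else acc

-- B's residue of a first line
def pvF (x : List Char) : String :=
  String.ofList (PySem.Chars.strip (List.take 3 (List.drop 11 x)))

theorem pvMetal_ok (res : String) (h : pvKnownMetals.contains res = true) :
    res ≠ "" ∧ (["HOH", "WAT", "DOD"].contains res) = false := by
  have hm : res ∈ ["ZN", "FE", "MG", "CA", "MN", "CU", "CO", "NI",
      "TB", "EU", "GD", "LA", "CE", "SM", "YB", "DY",
      "CD", "HG", "PB", "MO", "W", "V", "CR", "PT", "RU"] := by
    have he : pvKnownMetals = ["ZN", "FE", "MG", "CA", "MN", "CU", "CO", "NI",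
        "TB", "EU", "GD", "LA", "CE", "SM", "YB", "DY",
        "CD", "HG", "PB", "MO", "W", "V", "CR", "PT", "RU"] := by decide
    rw [he] at h
    simpa using h
  fin_cases hm <;> exact ⟨by decide, by decide⟩

theorem pvStep_eq (acc : PySem.Set String × PySem.Set String) (res : String) :
    (if pvKnownMetals.contains res then (acc.1.add res, acc.2)
     else if 1 ≤ PySem.Str.len res ∧ (PySem.Set.ofList ["HOH", "WAT", "DOD"]).contains res = false then
       (acc.1, acc.2.add res)
     else acc)
    = pvClass acc res := by
  rw [pvClass]
  by_cases hm : pvKnownMetals.contains res = true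
  · obtain ⟨h1, h2⟩ := pvMetal_ok res hm
    rw [if_pos hm, if_pos ⟨h1, h2⟩, if_pos hm]
  · have hm' : pvKnownMetals.contains res = false := Bool.eq_false_iff.mpr hm
    have hcond : (1 ≤ PySem.Str.len res ∧ (PySem.Set.ofList ["HOH", "WAT", "DOD"]).contains res = false)
        ↔ (res ≠ "" ∧ (["HOH", "WAT", "DOD"].contains res) = false) := by
      have hset : (PySem.Set.ofList ["HOH", "WAT", "DOD"] : PySem.Set String)
          = ["HOH", "WAT", "DOD"] := by decide
      have hlen : (1 ≤ PySem.Str.len res) ↔ res ≠ "" := by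
        rw [PySem.Str.len_eq]
        constructor
        · intro h he
          subst he
          simp at h
        · intro h
          have h1 : res.toList ≠ [] := fun he => h (by
            have := congrArg String.ofList he
            rwa [String.ofList_toList] at this)
          have : 0 < res.toList.length := List.length_pos_iff.mpr h1
          omega
      rw [hset, hlen]
      constructor
      · rintro ⟨a, b⟩
        exact ⟨a, by simpa [PySem.Set.contains] using b⟩
      · rintro ⟨a, b⟩
        exact ⟨a, by simpa [PySem.Set.contains] using b⟩
    rw [if_neg hm]
    by_cases hc : res ≠ "" ∧ (["HOH", "WAT", "DOD"].contains res) = false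
    · rw [if_pos (hcond.mpr hc), if_pos hc, if_neg hm]
    · rw [if_neg (fun h => hc (hcond.mp h)), if_neg hc]

theorem pvStepA_ofList (acc : PySem.Set String × PySem.Set String) (l : List Char) :
    pvStepA acc (String.ofList l)
      = if pvHET.isPrefixOf l = true then pvClass acc (pvResC l) else acc := by
  unfold pvStepA
  have hsw : PySem.Str.startswith (String.ofList l) "HETATM" = pvHET.isPrefixOf l := by
    rw [PySem.Str.startswith_eq, PySem.Chars.startswith]
    simp [pvHET]
  rw [hsw, pvResOf_ofList]
  by_cases hp : pvHET.isPrefixOf l = true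
  · rw [if_pos hp, if_pos hp]
    exact pvStep_eq acc (pvResC l)
  · rw [if_neg hp, if_neg hp]

theorem pvStepB_ofList (acc : PySem.Set String × PySem.Set String) (c : List Char) :
    pvStepB acc (String.ofList c) = pvClass acc (pvF (c.takeWhile (· ≠ '\n'))) := by
  rw [pvStepB, pvResOfChunk_ofList, pvClass, pvF]

theorem pvF_drop6 (l : List Char) : pvF (List.drop 6 l) = pvResC l := by
  rw [pvF, pvResC, List.drop_drop]

theorem pvLines (s : String) :
    (PySem.Str.split? s "\n").getD [] = (pvSplit ['\n'] s.toList).map String.ofList := by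
  have h1 : PySem.Chars.split? s.toList ("\n" : String).toList
      = some (pvSplit ['\n'] s.toList) := by
    rw [PySem.Chars.split?, if_neg (by simp), pvSplitOn_eq _ _ (by simp)]
    rfl
  rw [PySem.Str.split?, h1]
  rfl

theorem pvChunks (s : String) :
    (PySem.Str.split? ("\n" ++ s) "\nHETATM").getD []
      = (pvSplit pvSep2 ('\n' :: s.toList)).map String.ofList := by
  have htl : ("\n" ++ s).toList = '\n' :: s.toList := by
    rw [String.toList_append]
    rfl
  have h1 : PySem.Chars.split? ("\n" ++ s).toList ("\nHETATM" : String).toList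
      = some (pvSplit pvSep2 ('\n' :: s.toList)) := by
    rw [htl, PySem.Chars.split?, if_neg (by simp), pvSplitOn_eq _ _ (by simp)]
    rfl
  rw [PySem.Str.split?, h1]
  rfl

-- ===== VERDICT (by name: the statement is the Claim_ definition above) =====
-- ===== VERDICT (by name: the statement is the Claim_ definition above) =====
theorem pvFoldl_filter (L : List (List Char)) : ∀ init,
    L.foldl (fun acc l => if pvHET.isPrefixOf l = true then pvClass acc (pvResC l) else acc) init
      = (L.filter (fun l => pvHET.isPrefixOf l)).foldl (fun acc l => pvClass acc (pvResC l)) init := by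
  induction L with
  | nil => intro init; rfl
  | cons a L ih =>
    intro init
    by_cases hp : pvHET.isPrefixOf a = true
    · rw [List.foldl_cons, List.filter_cons_of_pos hp, List.foldl_cons, if_pos hp, ih]
    · rw [List.foldl_cons, List.filter_cons_of_neg (by simp [hp]), if_neg hp, ih]

set_option maxHeartbeats 1000000 in
theorem scan_pdb_hetatm_spec : Claim_equal_scan_pdb_hetatm := by
  intro pdb _
  unfold Spec_scan_pdb_hetatm
  obtain ⟨h, t, hsplit, hh, ht⟩ := pvMain pdb.toList.length pdb.toList le_rfl
  have hB : scan_pdb_hetatm_alt pdb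
      = t.foldl (fun acc c => pvStepB acc (String.ofList c))
          (PySem.Set.empty, PySem.Set.empty) := by
    rw [scan_pdb_hetatm_alt, pvChunks, hsplit, PySem.List.slice_from_one]
    simp [List.foldl_map]
  have hA : scan_pdb_hetatm pdb
      = (pvSplit ['\n'] pdb.toList).foldl (fun acc l => pvStepA acc (String.ofList l))
          (PySem.Set.empty, PySem.Set.empty) := by
    rw [scan_pdb_hetatm, pvLines, List.foldl_map]
  rw [hA, hB]
  have hstepA : (fun acc l => pvStepA acc (String.ofList l))
      = (fun acc l => if pvHET.isPrefixOf l = true then pvClass acc (pvResC l) else acc) := by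
    funext acc l
    rw [pvStepA_ofList]
  have hstepB : (fun acc c => pvStepB acc (String.ofList c))
      = (fun acc c => pvClass acc (pvF (c.takeWhile (· ≠ '\n')))) := by
    funext acc c
    rw [pvStepB_ofList]
  rw [hstepA, hstepB]
  have hBside : t.foldl (fun acc c => pvClass acc (pvF (c.takeWhile (· ≠ '\n'))))
        (PySem.Set.empty, PySem.Set.empty)
      = (t.map (List.takeWhile (· ≠ '\n'))).foldl (fun acc x => pvClass acc (pvF x))
        (PySem.Set.empty, PySem.Set.empty) := by rw [List.foldl_map]
  rw [hBside, ht, List.foldl_map]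
  have hfun : (fun (acc : PySem.Set String × PySem.Set String) (l : List Char) =>
        pvClass acc (pvF (List.drop 6 l))) = (fun acc l => pvClass acc (pvResC l)) := by
    funext acc l
    rw [pvF_drop6]
  rw [hfun]
  exact pvFoldl_filter _ _
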